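-- pv_equiv track=rewrite | github.com/Melvynkoh94/citi_tech_project | exampleApp/CitiTech_BuyerClass.py | displayHomes
-- ===== SOURCE A (Python) =====
-- def generateHouseDB():
--     houseDatabase = []
--
--     for x in range(1000):
--         locationList = ['tampines', 'bukit-timah', 'jurong-east', 'kallang']
--         location = locationList[x%4]
--
--         typeList = ['4room', '5room', 'EC']
--         houseType = typeList[x%3]
--
--         house = ['NAME', x*1000, houseType, location]
--         houseDatabase.append(house)
--
--     return houseDatabase
--
-- def displayHomes(maxAffordability):
--     # Compare with database of houses
--     #import HouseDatabaseGenerator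
--     houseDatabase = generateHouseDB()
--     # Sort by price
--     houseDatabaseByPrice = sorted(houseDatabase, key=lambda x: x[1])
--
--     for row in range(len(houseDatabaseByPrice)):
--         if (maxAffordability < houseDatabaseByPrice[row][1]):
--             return houseDatabaseByPrice[:row]
--             break
--         else:
--             continue
--     return houseDatabaseByPrice
-- ===== SOURCE B (Python) =====
-- def generateHouseDB():
--     houseDatabase = []
--     for x in range(1000):
--         locationList = ['tampines', 'bukit-timah', 'jurong-east', 'kallang']
--         location = locationList[x % 4]
--         typeList = ['4room', '5room', 'EC']
--         houseType = typeList[x % 3]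
--         houseDatabase.append(['NAME', x * 1000, houseType, location])
--     return houseDatabase
--
-- def displayHomes(maxAffordability):
--     # Binary search for the first house priced above maxAffordability, then slice.
--     db = sorted(generateHouseDB(), key=lambda h: h[1])
--     lo, hi = 0, len(db)
--     while lo < hi:
--         mid = (lo + hi) // 2
--         if maxAffordability < db[mid][1]:
--             hi = mid
--         else:
--             lo = mid + 1
--     return db[:lo]
-- ===== Notes on version B (the rewrite author's own statement) =====
-- stated objective: alternative
-- what changed: B replaces A's element-by-element scan for the first house priced above maxAffordability with a hand-written binary search (bisect_right-style) over the sorted database, then slices the same prefix.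
import Mathlib
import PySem

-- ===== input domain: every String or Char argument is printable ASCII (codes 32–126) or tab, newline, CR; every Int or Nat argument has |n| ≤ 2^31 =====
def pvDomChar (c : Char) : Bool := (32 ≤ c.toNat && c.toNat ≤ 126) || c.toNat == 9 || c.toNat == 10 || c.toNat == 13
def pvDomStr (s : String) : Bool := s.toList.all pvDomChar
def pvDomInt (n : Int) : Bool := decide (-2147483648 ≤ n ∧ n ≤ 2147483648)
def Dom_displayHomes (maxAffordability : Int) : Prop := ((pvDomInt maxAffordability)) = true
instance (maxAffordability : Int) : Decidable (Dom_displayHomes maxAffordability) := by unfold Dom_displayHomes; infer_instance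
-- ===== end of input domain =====

-- B replaces A's linear scan of the sorted house list with a binary search for the
-- first house priced above maxAffordability (same prefix returned; an alternative, not a speed claim).
set_option maxRecDepth 65536



-- ===== PORT A =====
-- Port of generateHouseDB (shared module helper, identical in A and B).
def generateHouseDB : List (String × Int × String × String) :=
  (PySem.List.pyRange 0 1000 1).foldl (fun houseDatabase x =>
    let locationList : List String := ["tampines", "bukit-timah", "jurong-east", "kallang"]
    let location := PySem.List.pyGetD locationList (PySem.Int.mod x 4) ""
    let typeList : List String := ["4room", "5room", "EC"]
    let houseType := PySem.List.pyGetD typeList (PySem.Int.mod x 3) ""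
    houseDatabase ++ [("NAME", x * 1000, houseType, location)]) []

-- A's 'for row in range(len(db)): if m < db[row][1]: return db[:row]' loop (early return = first branch).
def scanRowsA (m : Int) (db : List (String × Int × String × String)) :
    List Int → List (String × Int × String × String)
  | [] => db
  | row :: rest =>
      if m < (PySem.List.pyGetD db row ("", 0, "", "")).2.1 then
        PySem.List.slice db none (some row)
      else scanRowsA m db rest

def displayHomes (maxAffordability : Int) : List (String × Int × String × String) :=
  let houseDatabase := generateHouseDB
  let houseDatabaseByPrice := PySem.List.sorted houseDatabase (fun x => x.2.1)
  scanRowsA maxAffordability houseDatabaseByPrice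
    (PySem.List.pyRange 0 houseDatabaseByPrice.length 1)

-- ===== PORT B =====
-- B's hand-written binary search: the 'while lo < hi' loop of Source B.
def bsearchB (m : Int) (db : List (String × Int × String × String)) (lo hi : Nat) : Nat :=
  if lo < hi then
    let mid := (lo + hi) / 2
    if m < (PySem.List.pyGetD db (mid : Int) ("", 0, "", "")).2.1 then
      bsearchB m db lo mid
    else
      bsearchB m db (mid + 1) hi
  else lo
termination_by hi - lo
decreasing_by all_goals omega

def displayHomes_alt (maxAffordability : Int) : List (String × Int × String × String) :=
  let db := PySem.List.sorted generateHouseDB (fun h => h.2.1)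
  let lo := bsearchB maxAffordability db 0 db.length
  PySem.List.slice db none (some (lo : Int))

-- ===== PRECONDITION & SPEC =====
def Spec_displayHomes (maxAffordability : Int) (out : List (String × Int × String × String)) : Prop := out = displayHomes_alt maxAffordability
instance (maxAffordability : Int) (out : List (String × Int × String × String)) : Decidable (Spec_displayHomes maxAffordability out) := by unfold Spec_displayHomes; infer_instance

-- ===== CLAIM (what is proved, stated in full; the proofs are below) =====
def Claim_equal_displayHomes : Prop := ∀ (maxAffordability : Int), Dom_displayHomes maxAffordability → Spec_displayHomes maxAffordability (displayHomes maxAffordability)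

-- ===== LEMMAS AND PROOFS =====

-- A's scan returns a prefix db.take k whose cut k is characterised by the prices around it.
lemma scan_spec (m : Int) (db : List (String × Int × String × String)) :
    ∀ (n a : Nat), a + n = db.length →
    ∃ k, scanRowsA m db (PySem.List.pyRange (a : Int) (db.length : Int) 1) = db.take k ∧
      a ≤ k ∧ k ≤ db.length ∧
      (∀ j (hj : j < db.length), a ≤ j → j < k → ¬ (m < db[j].2.1)) ∧
      (∀ (hk : k < db.length), m < db[k].2.1) := by
  intro n
  induction n with
  | zero =>
      intro a ha
      have hae : a = db.length := by omega
      subst hae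
      refine ⟨db.length, ?_, le_refl _, le_refl _, ?_, ?_⟩
      · have : PySem.List.pyRange (db.length : Int) (db.length : Int) 1 = [] := by
          simp [PySem.List.pyRange]
        rw [this]
        simp [scanRowsA]
      · intro j hj _ hjk; omega
      · intro hk; omega
  | succ n ih =>
      intro a ha
      have halt : a < db.length := by omega
      have hcons : PySem.List.pyRange (a : Int) (db.length : Int) 1
          = (a : Int) :: PySem.List.pyRange ((a : Int) + 1) (db.length : Int) 1 := by
        exact PySem.List.pyRange_one_cons (by exact_mod_cast halt)
      rw [hcons]
      have hget : PySem.List.pyGetD db (a : Int) ("", 0, "", "") = db[a] := by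
        rw [PySem.List.pyGetD_eq_getElem db _ (Int.natCast_nonneg _) (by exact_mod_cast halt)]
        simp only [Int.toNat_natCast]
      by_cases hcmp : m < db[a].2.1
      · refine ⟨a, ?_, le_refl _, le_of_lt halt, ?_, ?_⟩
        · simp only [scanRowsA, hget, hcmp, if_pos]
          rw [PySem.List.slice_to _ (Int.natCast_nonneg _)]
          simp only [Int.toNat_natCast]
        · intro j hj haj hjk; omega
        · intro _; exact hcmp
      · have hstep : ((a : Int) + 1) = ((a + 1 : Nat) : Int) := by push_cast; ring
        obtain ⟨k, hres, hak, hklen, hmid, hlast⟩ := ih (a + 1) (by omega)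
        refine ⟨k, ?_, by omega, hklen, ?_, hlast⟩
        · simp only [scanRowsA, hget, hcmp, if_false]
          rw [hstep]
          exact hres
        · intro j hj haj hjk
          rcases Nat.eq_or_lt_of_le haj with heq | hlt
          · subst heq; exact hcmp
          · exact hmid j hj (by omega) hjk

-- B's binary search lands on a cut with the same characterisation (db price-monotone).
lemma bs_spec (m : Int) (db : List (String × Int × String × String))
    (mono : ∀ (p q : Nat) (hpq : p ≤ q) (hq : q < db.length),
      (db[p]'(Nat.lt_of_le_of_lt hpq hq)).2.1 ≤ (db[q]'hq).2.1) :
    ∀ (n lo hi : Nat), hi - lo = n → lo ≤ hi → hi ≤ db.length →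
    (∀ j (hj : j < db.length), j < lo → db[j].2.1 ≤ m) →
    (∀ j (hj : j < db.length), hi ≤ j → m < db[j].2.1) →
    bsearchB m db lo hi ≤ db.length ∧
      (∀ j (hj : j < db.length), j < bsearchB m db lo hi → db[j].2.1 ≤ m) ∧
      (∀ j (hj : j < db.length), bsearchB m db lo hi ≤ j → m < db[j].2.1) := by
  intro n
  induction n using Nat.strong_induction_on with
  | _ n ih =>
      intro lo hi hn hlohi hhil hlow hhigh
      by_cases hlt : lo < hi
      · have hmidlt : (lo + hi) / 2 < hi := by omega
        have hmidge : lo ≤ (lo + hi) / 2 := by omega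
        have hmidlen : (lo + hi) / 2 < db.length := by omega
        have hget : PySem.List.pyGetD db (((lo + hi) / 2 : Nat) : Int) ("", 0, "", "")
            = db[(lo + hi) / 2] := by
          rw [PySem.List.pyGetD_eq_getElem db _ (Int.natCast_nonneg _) (by exact_mod_cast hmidlen)]
          simp only [Int.toNat_natCast]
        rw [bsearchB]
        simp only [hlt, if_pos, hget]
        by_cases hcmp : m < db[(lo + hi) / 2].2.1
        · rw [if_pos hcmp]
          refine ih ((lo + hi) / 2 - lo) (by omega) lo ((lo + hi) / 2) rfl hmidge (by omega)
            hlow ?_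
          intro j hj hmj
          calc m < db[(lo + hi) / 2].2.1 := hcmp
            _ ≤ db[j].2.1 := mono _ _ hmj hj
        · rw [if_neg hcmp]
          refine ih (hi - ((lo + hi) / 2 + 1)) (by omega) ((lo + hi) / 2 + 1) hi rfl
            (by omega) hhil ?_ hhigh
          intro j hj hjm
          calc db[j].2.1 ≤ db[(lo + hi) / 2].2.1 := mono _ _ (by omega) hmidlen
            _ ≤ m := not_lt.mp hcmp
      · rw [bsearchB]
        simp only [hlt, if_false]
        have : lo = hi := by omega
        subst this
        exact ⟨hhil, fun j hj hjl => hlow j hj hjl, fun j hj hlj => hhigh j hj hlj⟩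

-- Two cuts with the same price characterisation coincide, so the two prefixes agree.
lemma displayHomes_eq_generic (m : Int) (db : List (String × Int × String × String))
    (hp : List.Pairwise (fun a b => a.2.1 ≤ b.2.1) db) :
    scanRowsA m db (PySem.List.pyRange 0 (db.length : Int) 1)
      = PySem.List.slice db none (some ((bsearchB m db 0 db.length : Nat) : Int)) := by
  have mono : ∀ (p q : Nat) (hpq : p ≤ q) (hq : q < db.length),
      (db[p]'(Nat.lt_of_le_of_lt hpq hq)).2.1 ≤ (db[q]'hq).2.1 := by
    intro p q hpq hq
    rcases Nat.eq_or_lt_of_le hpq with rfl | h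
    · exact le_refl _
    · exact List.pairwise_iff_getElem.mp hp p q _ hq h
  obtain ⟨kA, hres, -, hAlen, hAmid, hAlast⟩ := scan_spec m db db.length 0 (by omega)
  rw [show ((0:Nat):Int) = (0:Int) from rfl] at hres
  rw [hres, PySem.List.slice_to _ (Int.natCast_nonneg _), Int.toNat_natCast]
  obtain ⟨hBlen, hB2, hB3⟩ := bs_spec m db mono db.length 0 db.length (by omega) (by omega)
    (le_refl _) (fun j hj hj0 => by omega) (fun j hj hlj => absurd hlj (not_le.mpr hj))
  have hk : kA = bsearchB m db 0 db.length := by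
    rcases lt_trichotomy kA (bsearchB m db 0 db.length) with h | h | h
    · have hkl : kA < db.length := by omega
      exact absurd (hB2 kA hkl h) (not_le.mpr (hAlast hkl))
    · exact h
    · have hkl : bsearchB m db 0 db.length < db.length := by omega
      exact absurd (hB3 _ hkl (by omega))
        (not_lt.mpr (not_lt.mp (hAmid _ hkl (by omega) h)))
  rw [hk]

-- ===== VERDICT (by name: the statement is the Claim_ definition above) =====
theorem displayHomes_spec : Claim_equal_displayHomes := by
  intro m _
  unfold Spec_displayHomes displayHomes displayHomes_alt
  exact displayHomes_eq_generic m _ (PySem.List.sorted_pairwise generateHouseDB (fun h => h.2.1))
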